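-- pv_equiv track=rewrite | github.com/HackademINT/404CTF-2025 | SecuriteMaterielle/code-radiospatial-n-1/chall_creation/util.py | pocsag_crc
-- ===== SOURCE A (Python) =====
-- def pocsag_crc(data: int):
-- 	generator = 0b11101101001
-- 	denom = generator << 20
-- 	crc = data << 10
--
-- 	for i in range(0, 21):
-- 		b = (crc >> (30 - i)) & 1
--
-- 		if b:
-- 			crc ^= denom
--
-- 		denom >>= 1
--
-- 	return crc & 0x3FF
-- ===== SOURCE B (Python) =====
-- def pocsag_crc(data: int):
-- 	generator = 0b11101101001
-- 	reg = 0
--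
-- 	for k in range(20, -1, -1):
-- 		reg = (reg << 1) ^ (((data >> k) & 1) << 10)
--
-- 		if reg & 0x400:
-- 			reg ^= generator
--
-- 	return reg
-- ===== Notes on version B (the rewrite author's own statement) =====
-- stated objective: alternative
-- what changed: Replaced the shifting-divisor long division (a 31-bit crc register xored with a sliding generator<<i and masked at the end) by an LFSR-style running remainder: the 21 data bits are fed MSB-first into an 11-bit register that is reduced by the generator whenever bit 10 becomes set, so no wide register, no shifting divisor and no final mask are needed.
import Mathlib
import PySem

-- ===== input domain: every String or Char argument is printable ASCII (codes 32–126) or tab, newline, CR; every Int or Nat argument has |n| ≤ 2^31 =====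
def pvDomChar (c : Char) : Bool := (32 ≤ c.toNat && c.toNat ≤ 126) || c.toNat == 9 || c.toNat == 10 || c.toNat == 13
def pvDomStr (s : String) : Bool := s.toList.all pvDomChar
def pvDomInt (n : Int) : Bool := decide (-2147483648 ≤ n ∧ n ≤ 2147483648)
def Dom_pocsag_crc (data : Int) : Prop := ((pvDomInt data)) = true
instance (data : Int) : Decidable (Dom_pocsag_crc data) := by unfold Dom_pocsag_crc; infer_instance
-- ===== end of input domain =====

-- B replaces A's shifting-divisor long division by an LFSR-style running 11-bit remainder fed the 21 data bits MSB-first (alternative decomposition, same cost).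


-- ===== PORT A =====
-- literal transliteration of Source A: crc = data << 10, denom = generator << 20; 21 iterations
-- testing bit (30 - i) of crc and xoring the sliding denom; returns crc & 0x3FF.
-- ('for i in range(0, 21)' is the fold over List.range 21; '30 - i' is exact since i ≤ 20;
--  Python <<,>>,&,^ are Lean's <<< / >>> (Nat shift amount) and PySem.Int.band / bxor)
def pocsag_crc (data : Int) : Int :=
  let generator : Int := 1897
  let st := (List.range 21).foldl
    (fun (st : Int × Int) (i : Nat) =>
      let b := PySem.Int.band (st.1 >>> (30 - i)) 1
      (if b ≠ 0 then PySem.Int.bxor st.1 st.2 else st.1, st.2 >>> (1:Nat)))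
    (data <<< (10:Nat), generator <<< (20:Nat))
  PySem.Int.band st.1 1023

-- ===== PORT B =====
-- literal transliteration of Source B: 11-bit LFSR register, the 21 data bits fed MSB-first,
-- reduced by the generator whenever bit 10 becomes set
-- ('for k in range(20, -1, -1)' is the fold over PySem.List.pyRange 20 (-1) (-1); every k ≥ 0, so 'data >> k' is data >>> k.toNat)
def pocsag_crc_alt (data : Int) : Int :=
  let generator : Int := 1897
  (PySem.List.pyRange 20 (-1) (-1)).foldl
    (fun (reg : Int) (k : Int) =>
      let reg := PySem.Int.bxor (reg <<< (1:Nat)) ((PySem.Int.band (data >>> k.toNat) 1) <<< (10:Nat))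
      if PySem.Int.band reg 1024 ≠ 0 then PySem.Int.bxor reg generator else reg)
    0

-- ===== PRECONDITION & SPEC =====
def Spec_pocsag_crc (data : Int) (out : Int) : Prop := out = pocsag_crc_alt data
instance (data : Int) (out : Int) : Decidable (Spec_pocsag_crc data out) := by unfold Spec_pocsag_crc; infer_instance

-- ===== CLAIM (what is proved, stated in full; the proofs are below) =====
def Claim_equal_pocsag_crc : Prop := ∀ (data : Int), Dom_pocsag_crc data → Spec_pocsag_crc data (pocsag_crc data)

-- ===== LEMMAS AND PROOFS =====

-- the two loop bodies as named step functions (definitionally the lambdas of the ports)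
def pvStepA (st : Int × Int) (i : Nat) : Int × Int :=
  let b := PySem.Int.band (st.1 >>> (30 - i)) 1
  (if b ≠ 0 then PySem.Int.bxor st.1 st.2 else st.1, st.2 >>> (1:Nat))

def pvStepB (data : Int) (reg : Int) (k : Int) : Int :=
  let r := PySem.Int.bxor (reg <<< (1:Nat)) ((PySem.Int.band (data >>> k.toNat) 1) <<< (10:Nat))
  if PySem.Int.band r 1024 ≠ 0 then PySem.Int.bxor r (1897 : Int) else r

lemma portA_eq (data : Int) :
    pocsag_crc data
      = PySem.Int.band (((List.range 21).foldl pvStepA (data <<< (10:Nat), (1897 : Int) <<< (20:Nat))).1) 1023 := rfl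

lemma portB_eq (data : Int) :
    pocsag_crc_alt data = (PySem.List.pyRange 20 (-1) (-1)).foldl (pvStepB data) 0 := rfl

-- ---- cast helpers ----
lemma natCast_shiftLeft' (m k : Nat) : ((m : Int) <<< k) = ((m <<< k : Nat) : Int) := by
  simp [Int.shiftLeft_eq, Nat.shiftLeft_eq]

lemma natCast_shiftRight' (m k : Nat) : ((m : Int) >>> k) = ((m >>> k : Nat) : Int) := by
  simp [Int.shiftRight_eq_div_pow, Nat.shiftRight_eq_div_pow]

-- ---- Nat bit kit ----
lemma lt_pow_mono {x n m : Nat} (h : x < 2 ^ n) (hnm : n ≤ m) : x < 2 ^ m :=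
  lt_of_lt_of_le h (Nat.pow_le_pow_right (by norm_num) hnm)

-- adding into disjoint high bits is a xor
lemma nx (H u n : Nat) (h : u < 2 ^ n) : H * 2 ^ n + u = (H <<< n) ^^^ u := by
  rw [← Nat.shiftLeft_eq, Nat.shiftLeft_add_eq_or_of_lt h]
  apply Nat.eq_of_testBit_eq
  intro i
  by_cases hi : n ≤ i
  · have hu : u.testBit i = false := Nat.testBit_eq_false_of_lt (lt_pow_mono h hi)
    simp [Nat.testBit_xor, hu]
  · have hs : (H <<< n).testBit i = false := by
      simp [Nat.testBit_shiftLeft, hi]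
    simp [Nat.testBit_xor, hs]

lemma nxv (H u v n : Nat) (hu : u < 2 ^ n) (hv : v < 2 ^ n) :
    (H * 2 ^ n + u) ^^^ v = H * 2 ^ n + (u ^^^ v) := by
  rw [nx H u n hu, nx H (u ^^^ v) n (Nat.xor_lt_two_pow hu hv), Nat.xor_assoc]

-- xor with an all-ones mask is complement
lemma nm (u n : Nat) (h : u < 2 ^ n) : u ^^^ (2 ^ n - 1) = 2 ^ n - 1 - u := by
  induction n generalizing u with
  | zero => interval_cases u; decide
  | succ n ih =>
    have h2 : 2 ^ (n + 1) = 2 * 2 ^ n := by ring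
    have hu2 : u / 2 < 2 ^ n := by omega
    have ihh := ih (u / 2) hu2
    have hdiv : (u ^^^ (2 ^ (n + 1) - 1)) / 2 = (u / 2) ^^^ ((2 ^ (n + 1) - 1) / 2) := by
      simpa [Nat.shiftRight_one] using (Nat.shiftRight_xor_distrib (a := u) (b := 2 ^ (n+1) - 1) (i := 1))
    have hm2 : (2 ^ (n + 1) - 1) / 2 = 2 ^ n - 1 := by omega
    have hmod : (u ^^^ (2 ^ (n + 1) - 1)) % 2 = (u + (2 ^ (n + 1) - 1)) % 2 :=
      Nat.xor_mod_two_eq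
    have := Nat.div_add_mod (u ^^^ (2 ^ (n + 1) - 1)) 2
    rw [hm2] at hdiv
    rw [ihh] at hdiv
    omega

lemma nc (u v n : Nat) (hu : u < 2 ^ n) (hv : v < 2 ^ n) :
    (2 ^ n - 1 - u) ^^^ v = 2 ^ n - 1 - (u ^^^ v) := by
  rw [← nm u n hu, Nat.xor_assoc, Nat.xor_comm (2 ^ n - 1) v, ← Nat.xor_assoc,
    nm (u ^^^ v) n (Nat.xor_lt_two_pow hu hv)]

lemma shiftdown (g n : Nat) (hn : 0 < n) : (g <<< n) >>> 1 = g <<< (n - 1) := by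
  rw [Nat.shiftLeft_eq, Nat.shiftLeft_eq, Nat.shiftRight_one]
  have : 2 ^ n = 2 ^ (n - 1) * 2 := by
    rw [← pow_succ]; congr 1; omega
  rw [this, ← Nat.mul_assoc]
  exact Nat.mul_div_cancel _ (by norm_num)

lemma modsplit (r n : Nat) : r % 2 ^ (n + 1) = ((r.testBit n).toNat <<< n) ^^^ (r % 2 ^ n) := by
  have hb : (r.testBit n).toNat = r / 2 ^ n % 2 := by
    rw [Nat.testBit_eq_decide_div_mod_eq]
    rcases Nat.mod_two_eq_zero_or_one (r / 2 ^ n) with h | h <;> simp [h]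
  have eq1 : r % 2 ^ (n + 1) = (r.testBit n).toNat * 2 ^ n + r % 2 ^ n := by
    rw [Nat.pow_succ, Nat.mod_mul, hb]; ring
  rw [eq1, nx _ _ _ (Nat.mod_lt _ (Nat.two_pow_pos n))]

-- ---- Int-with-high-part kit: hi·2^m + u, the low part u a Nat ----
lemma s1 (hi : Int) (u : Nat) (m k : Nat) (hk : k ≤ m) :
    (hi * 2 ^ m + (u : Int)) >>> k = hi * 2 ^ (m - k) + ((u >>> k : Nat) : Int) := by
  have hsplit : hi * 2 ^ m + (u : Int) = (u : Int) + (hi * 2 ^ (m - k)) * 2 ^ k := by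
    have : (2 : Int) ^ (m - k) * 2 ^ k = 2 ^ m := by
      rw [← pow_add]; congr 1; omega
    rw [mul_assoc, this]; ring
  rw [Int.shiftRight_eq_div_pow, hsplit]
  push_cast
  rw [Int.add_mul_ediv_right _ _ (by positivity : ((2 : Int) ^ k) ≠ 0)]
  rw [Int.shiftRight_eq_div_pow]
  push_cast
  ring

lemma s2 (hi : Int) (u : Nat) (m : Nat) (hm : 0 < m) :
    PySem.Int.band (hi * 2 ^ m + (u : Int)) 1 = ((u % 2 : Nat) : Int) := by
  rw [PySem.Int.band_one, PySem.Int.mod_eq_emod_of_pos (by norm_num)]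
  have h2 : (2 : Int) ^ m = 2 * 2 ^ (m - 1) := by
    rw [← pow_succ']; congr 1; omega
  have hc : ((u % 2 : Nat) : Int) = (u : Int) % 2 := by push_cast; rfl
  have he : hi * (2 * 2 ^ (m - 1)) = 2 * (hi * 2 ^ (m - 1)) := by ring
  rw [h2, hc, he]
  omega

lemma s3 (hi : Int) (u v : Nat) (hu : u < 2 ^ 31) (hv : v < 2 ^ 31) :
    PySem.Int.bxor (hi * 2 ^ 31 + (u : Int)) (v : Int) = hi * 2 ^ 31 + ((u ^^^ v : Nat) : Int) := by
  have hxlt : u ^^^ v < 2 ^ 31 := Nat.xor_lt_two_pow hu hv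
  rcases (by omega : 0 ≤ hi ∨ hi < 0) with hpos | hneg
  · have ha : 0 ≤ hi * 2 ^ 31 + (u : Int) := by positivity
    have htn : (hi * 2 ^ 31 + (u : Int)).toNat = hi.toNat * 2 ^ 31 + u := by
      have h31 : (2 : Int) ^ 31 = 2147483648 := by norm_num
      have h31n : (2 : Nat) ^ 31 = 2147483648 := by norm_num
      rw [h31, h31n]
      omega
    rw [PySem.Int.bxor, if_pos ha, if_pos (by positivity : (0:Int) ≤ (v:Int))]
    rw [htn, Int.toNat_natCast, nxv _ _ _ _ hu hv]
    push_cast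
    have : ((hi.toNat : Int)) = hi := Int.toNat_of_nonneg hpos
    rw [this]
  · have ha : ¬ (0 ≤ hi * 2 ^ 31 + (u : Int)) := by
      have h31 : (2 : Int) ^ 31 = 2147483648 := by norm_num
      rw [h31]; omega
    have htn : (-(hi * 2 ^ 31 + (u : Int)) - 1).toNat = (-hi - 1).toNat * 2 ^ 31 + (2 ^ 31 - 1 - u) := by
      have h31 : (2 : Int) ^ 31 = 2147483648 := by norm_num
      have h31n : (2 : Nat) ^ 31 = 2147483648 := by norm_num
      rw [h31, h31n]
      omega
    rw [PySem.Int.bxor, if_neg ha, if_pos (by positivity : (0:Int) ≤ (v:Int))]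
    rw [htn, Int.toNat_natCast, nxv _ _ _ _ (by omega) hv, nc _ _ _ hu hv]
    have h31n : (2 : Nat) ^ 31 = 2147483648 := by norm_num
    rw [h31n] at hxlt
    push_cast
    omega

lemma s4 (hi : Int) (u : Nat) (hu : u < 2 ^ 10) :
    PySem.Int.band (hi * 2 ^ 31 + (u : Int)) 1023 = (u : Int) := by
  have hmask : ∀ x : Nat, x &&& 1023 = x % 1024 := by
    intro x
    have := Nat.and_two_pow_sub_one_eq_mod x 10
    norm_num at this
    exact this
  rcases (by omega : 0 ≤ hi ∨ hi < 0) with hpos | hneg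
  · have ha : 0 ≤ hi * 2 ^ 31 + (u : Int) := by positivity
    rw [PySem.Int.band, if_pos ha, if_pos (by norm_num : (0:Int) ≤ 1023)]
    have htn : (hi * 2 ^ 31 + (u : Int)).toNat = hi.toNat * 2 ^ 31 + u := by
      have h31 : (2 : Int) ^ 31 = 2147483648 := by norm_num
      have h31n : (2 : Nat) ^ 31 = 2147483648 := by norm_num
      rw [h31, h31n]; omega
    have h1023 : ((1023 : Int).toNat) = 1023 := rfl
    rw [htn, h1023, hmask]
    have h31n : (2 : Nat) ^ 31 = 2147483648 := by norm_num
    have : (hi.toNat * 2 ^ 31 + u) % 1024 = u := by rw [h31n]; omega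
    rw [this]
  · have ha : ¬ (0 ≤ hi * 2 ^ 31 + (u : Int)) := by
      have h31 : (2 : Int) ^ 31 = 2147483648 := by norm_num
      rw [h31]; omega
    rw [PySem.Int.band, if_neg ha, if_pos (by norm_num : (0:Int) ≤ 1023)]
    have htn : (-(hi * 2 ^ 31 + (u : Int)) - 1).toNat = (-hi - 1).toNat * 2 ^ 31 + (2 ^ 31 - 1 - u) := by
      have h31 : (2 : Int) ^ 31 = 2147483648 := by norm_num
      have h31n : (2 : Nat) ^ 31 = 2147483648 := by norm_num
      rw [h31, h31n]; omega
    have h1023 : ((1023 : Int).toNat) = 1023 := rfl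
    rw [htn, h1023, Nat.land_comm, hmask]
    have h31n : (2 : Nat) ^ 31 = 2147483648 := by norm_num
    have hmod : ((-hi - 1).toNat * 2 ^ 31 + (2 ^ 31 - 1 - u)) % 1024 = 1023 - u := by
      rw [h31n]; omega
    rw [hmod]
    omega

-- ---- invariant algebra: one division step of A is one LFSR step of B ----
lemma alg (reg r n gg : Nat) :
    ((reg <<< (n + 1)) ^^^ ((r % 2 ^ (n + 1)) <<< 10)) ^^^ (gg <<< n)
      = ((((reg <<< 1) ^^^ (((r.testBit n).toNat) <<< 10)) ^^^ gg) <<< n) ^^^ ((r % 2 ^ n) <<< 10) := by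
  rw [modsplit]
  simp only [Nat.shiftLeft_xor_distrib, ← Nat.shiftLeft_add]
  have h1 : (1 : Nat) + n = n + 1 := by omega
  have h2 : (10 : Nat) + n = n + 10 := by omega
  rw [h1, h2]
  simp [Nat.xor_comm, Nat.xor_left_comm]

lemma tb (reg r n : Nat) :
    ((reg <<< (n + 1)) ^^^ ((r % 2 ^ (n + 1)) <<< 10)).testBit (10 + n)
      = ((reg <<< 1) ^^^ (((r.testBit n).toNat) <<< 10)).testBit 10 := by
  have e1 : (reg <<< (n + 1)).testBit (10 + n) = reg.testBit 9 := by
    rw [Nat.testBit_shiftLeft]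
    have : 10 + n - (n + 1) = 9 := by omega
    simp [this, show n + 1 ≤ 10 + n by omega]
  have e2 : ((r % 2 ^ (n + 1)) <<< 10).testBit (10 + n) = r.testBit n := by
    rw [Nat.testBit_shiftLeft]
    have : 10 + n - 10 = n := by omega
    simp [this, Nat.testBit_mod_two_pow]
  have e3 : (reg <<< 1).testBit 10 = reg.testBit 9 := by
    rw [Nat.testBit_shiftLeft]
    norm_num
  have e4 : (((r.testBit n).toNat) <<< 10).testBit 10 = r.testBit n := by
    rw [Nat.testBit_shiftLeft]
    cases hb : r.testBit n <;> simp
  rw [Nat.testBit_xor, Nat.testBit_xor, e1, e2, e3, e4]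

lemma red_lt (x : Nat) (hx : x < 2 ^ 11) (hb : x.testBit 10 = false) : x < 2 ^ 10 := by
  apply Nat.lt_pow_two_of_testBit
  intro i hi
  rcases eq_or_lt_of_le hi with rfl | hi'
  · exact hb
  · exact Nat.testBit_eq_false_of_lt (lt_pow_mono hx hi')

-- ---- the main loop invariant: after some steps A's crc is hi·2^31 xor B's register
-- shifted to the current window xor the not-yet-consumed data bits ----
lemma main_inv : ∀ (n : Nat), n ≤ 21 → ∀ (hi dInt data : Int) (r reg : Nat),
    data = hi * (2:Int) ^ 21 + (r : Int) → r < 2 ^ 21 → reg < 2 ^ 10 →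
    (0 < n → dInt = ((1897 <<< (n - 1) : Nat) : Int)) →
    PySem.Int.band (((List.range' (21 - n) n).foldl pvStepA
        (hi * (2:Int) ^ 31 + ((((reg <<< n) ^^^ ((r % 2 ^ n) <<< 10)) : Nat) : Int), dInt)).1) 1023
      = ((List.range n).reverse.map (fun k => (k : Int))).foldl (pvStepB data) (reg : Int) := by
  intro n
  induction n with
  | zero =>
    intro _ hi dInt data r reg hdata hr hreg _
    have hu : (reg <<< 0) ^^^ ((r % 2 ^ 0) <<< 10) = reg := by
      simp [Nat.shiftLeft_zero, Nat.mod_one, Nat.zero_shiftLeft]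
    simp only [List.range'_zero, List.foldl_nil, List.range_zero, List.reverse_nil]
    rw [hu]
    exact s4 hi reg hreg
  | succ n ih =>
    intro hn hi dInt data r reg hdata hr hreg hd
    have hn20 : n ≤ 20 := by omega
    have hrange : 21 - (n + 1) = 20 - n := by omega
    have hrange2 : (20 - n) + 1 = 21 - n := by omega
    rw [hrange, List.range'_succ, hrange2, List.foldl_cons]
    have hBlist : ((List.range (n + 1)).reverse.map (fun k => (k : Int)))
        = (↑n) :: ((List.range n).reverse.map (fun k => (k : Int))) := by
      simp [List.range_succ]
    rw [hBlist, List.foldl_cons]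
    set bitb := r.testBit n with hbitb
    set u := (reg <<< (n + 1)) ^^^ ((r % 2 ^ (n + 1)) <<< 10) with huu
    set regN := (reg <<< 1) ^^^ (bitb.toNat <<< 10) with hregN
    have hub : u < 2 ^ 31 := by
      have h1 : reg <<< (n + 1) < 2 ^ (10 + (n + 1)) := Nat.shiftLeft_lt hreg
      have h2 : (r % 2 ^ (n + 1)) <<< 10 < 2 ^ ((n + 1) + 10) :=
        Nat.shiftLeft_lt (Nat.mod_lt _ (Nat.two_pow_pos _))
      exact Nat.xor_lt_two_pow (lt_pow_mono h1 (by omega)) (lt_pow_mono h2 (by omega))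
    have hgb : (1897 <<< n : Nat) < 2 ^ 31 := by
      have : (1897 : Nat) < 2 ^ 11 := by norm_num
      exact lt_pow_mono (Nat.shiftLeft_lt this) (by omega)
    have hregNb : regN < 2 ^ 11 := by
      have h1 : reg <<< 1 < 2 ^ 11 := Nat.shiftLeft_lt hreg
      have h2 : bitb.toNat <<< 10 < 2 ^ 11 := by
        have : bitb.toNat < 2 ^ 1 := by cases bitb <;> decide
        exact Nat.shiftLeft_lt this
      exact Nat.xor_lt_two_pow h1 h2
    have hi30 : 30 - (20 - n) = 10 + n := by omega
    have hbu : PySem.Int.band ((hi * (2:Int) ^ 31 + (u : Int)) >>> (30 - (20 - n))) 1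
        = (((u.testBit (10 + n)).toNat : Nat) : Int) := by
      rw [hi30, s1 hi u 31 (10 + n) (by omega), s2 _ _ _ (by omega)]
      congr 1
      rw [Nat.shiftRight_eq_div_pow, Nat.testBit_eq_decide_div_mod_eq]
      rcases Nat.mod_two_eq_zero_or_one (u / 2 ^ (10 + n)) with h | h <;> simp [h]
    have hbd : PySem.Int.band (data >>> ((n : Int)).toNat) 1 = ((bitb.toNat : Nat) : Int) := by
      rw [Int.toNat_natCast, hdata, s1 hi r 21 n (by omega), s2 _ _ _ (by omega)]
      congr 1
      rw [Nat.shiftRight_eq_div_pow, hbitb, Nat.testBit_eq_decide_div_mod_eq]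
      rcases Nat.mod_two_eq_zero_or_one (r / 2 ^ n) with h | h <;> simp [h]
    have hstepB : PySem.Int.bxor ((reg : Int) <<< (1:Nat))
        ((PySem.Int.band (data >>> ((n : Int)).toNat) 1) <<< (10:Nat)) = ((regN : Nat) : Int) := by
      rw [hbd, natCast_shiftLeft' bitb.toNat 10, natCast_shiftLeft' reg 1, PySem.Int.bxor_natCast]
    have htbeq : u.testBit (10 + n) = regN.testBit 10 := tb reg r n
    have hcast1024 : (1024 : Int) = ((1024 : Nat) : Int) := rfl
    have hcast1897 : (1897 : Int) = ((1897 : Nat) : Int) := rfl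
    have hand : regN &&& 1024 = (regN.testBit 10).toNat * 2 ^ 10 := by
      have h := Nat.and_two_pow regN 10
      norm_num at h ⊢
      exact h
    by_cases hc : regN.testBit 10 = true
    · have hAcond : (((u.testBit (10 + n)).toNat : Nat) : Int) ≠ 0 := by
        rw [htbeq, hc]; decide
      have hBcond : PySem.Int.band ((regN : Nat) : Int) 1024 ≠ 0 := by
        rw [hcast1024, PySem.Int.band_natCast, hand, hc]
        norm_num
      have hdv : dInt = ((1897 <<< n : Nat) : Int) := by
        have := hd (by omega)
        simpa using this
      have hxor : PySem.Int.bxor (hi * (2:Int) ^ 31 + (u : Int)) dInt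
          = hi * (2:Int) ^ 31 + (((u ^^^ (1897 <<< n) : Nat)) : Int) := by
        rw [hdv]; exact s3 hi u _ hub hgb
      have halg : u ^^^ (1897 <<< n) = ((regN ^^^ 1897) <<< n) ^^^ ((r % 2 ^ n) <<< 10) :=
        alg reg r n 1897
      have hregN2 : regN ^^^ 1897 < 2 ^ 10 := by
        apply red_lt _ (Nat.xor_lt_two_pow hregNb (by norm_num))
        rw [Nat.testBit_xor, hc]
        decide
      have hBxor : PySem.Int.bxor ((regN : Nat) : Int) (1897 : Int) = (((regN ^^^ 1897 : Nat)) : Int) := by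
        rw [hcast1897, PySem.Int.bxor_natCast]
      have hdnew : 0 < n → dInt >>> (1:Nat) = ((1897 <<< (n - 1) : Nat) : Int) := by
        intro hpos
        rw [hdv, natCast_shiftRight', shiftdown _ _ hpos]
      show PySem.Int.band (((List.range' (21 - n) n).foldl pvStepA
          (pvStepA (hi * (2:Int) ^ 31 + ((u : Nat) : Int), dInt) (20 - n))).1) 1023
        = (((List.range n).reverse.map (fun k => (k : Int))).foldl (pvStepB data)
            (pvStepB data (reg : Int) (n : Int)))
      rw [show pvStepA (hi * (2:Int) ^ 31 + ((u : Nat) : Int), dInt) (20 - n)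
            = (hi * (2:Int) ^ 31 + (((((regN ^^^ 1897) <<< n) ^^^ ((r % 2 ^ n) <<< 10)) : Nat) : Int), dInt >>> (1:Nat)) by
          simp only [pvStepA, hbu]
          rw [if_pos hAcond, hxor, halg]]
      rw [show pvStepB data (reg : Int) (n : Int)
            = (((regN ^^^ 1897 : Nat)) : Int) by
          simp only [pvStepB, hstepB]
          rw [if_pos hBcond, hBxor]]
      exact ih (by omega) hi (dInt >>> (1:Nat)) data r (regN ^^^ 1897) hdata hr hregN2 hdnew
    · have hcf : regN.testBit 10 = false := by
        cases h : regN.testBit 10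
        · rfl
        · exact absurd h hc
      have hAcond : ¬ ((((u.testBit (10 + n)).toNat : Nat) : Int) ≠ 0) := by
        rw [htbeq, hcf]; decide
      have hBcond : ¬ (PySem.Int.band ((regN : Nat) : Int) 1024 ≠ 0) := by
        rw [hcast1024, PySem.Int.band_natCast, hand, hcf]
        norm_num
      have halg : u = (regN <<< n) ^^^ ((r % 2 ^ n) <<< 10) := by
        have h := alg reg r n 0
        simpa using h
      have hregN2 : regN < 2 ^ 10 := red_lt _ hregNb hcf
      have hdnew : 0 < n → dInt >>> (1:Nat) = ((1897 <<< (n - 1) : Nat) : Int) := by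
        intro hpos
        have hdv : dInt = ((1897 <<< n : Nat) : Int) := by
          have := hd (by omega); simpa using this
        rw [hdv, natCast_shiftRight', shiftdown _ _ hpos]
      show PySem.Int.band (((List.range' (21 - n) n).foldl pvStepA
          (pvStepA (hi * (2:Int) ^ 31 + ((u : Nat) : Int), dInt) (20 - n))).1) 1023
        = (((List.range n).reverse.map (fun k => (k : Int))).foldl (pvStepB data)
            (pvStepB data (reg : Int) (n : Int)))
      rw [show pvStepA (hi * (2:Int) ^ 31 + ((u : Nat) : Int), dInt) (20 - n)
            = (hi * (2:Int) ^ 31 + ((((regN <<< n) ^^^ ((r % 2 ^ n) <<< 10)) : Nat) : Int), dInt >>> (1:Nat)) by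
          simp only [pvStepA, hbu]
          rw [if_neg hAcond, ← halg]]
      rw [show pvStepB data (reg : Int) (n : Int) = ((regN : Nat) : Int) by
          simp only [pvStepB, hstepB]
          rw [if_neg hBcond]]
      exact ih (by omega) hi (dInt >>> (1:Nat)) data r regN hdata hr hregN2 hdnew

-- ===== VERDICT (by name: the statement is the Claim_ definition above) =====
theorem pocsag_crc_spec : Claim_equal_pocsag_crc := by
  intro data _
  show pocsag_crc data = pocsag_crc_alt data
  rw [portA_eq, portB_eq]
  have hpy : PySem.List.pyRange 20 (-1) (-1) = (List.range 21).reverse.map (fun k => (k : Int)) := by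
    decide
  rw [hpy]
  have h21pos : (0:Int) < 2 ^ 21 := by positivity
  set hi := data / 2 ^ 21 with hhi
  set r : Nat := (data % 2 ^ 21).toNat with hrdef
  have hrcast : ((r : Int)) = data % 2 ^ 21 := Int.toNat_of_nonneg (Int.emod_nonneg data (by positivity))
  have hrlt : r < 2 ^ 21 := by
    have h1 : data % 2 ^ 21 < 2 ^ 21 := Int.emod_lt_of_pos data h21pos
    have h2 : (2:Int) ^ 21 = 2097152 := by norm_num
    have h3 : (2:Nat) ^ 21 = 2097152 := by norm_num
    rw [h2] at h1
    rw [h3, hrdef]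
    omega
  have hdata : data = hi * (2:Int) ^ 21 + (r : Int) := by
    rw [hrcast, hhi]
    have := Int.mul_ediv_add_emod data (2 ^ 21)
    omega
  have hinit : data <<< (10:Nat) = hi * (2:Int) ^ 31 + ((((0 <<< 21) ^^^ ((r % 2 ^ 21) <<< 10)) : Nat) : Int) := by
    have h1 : ((0 <<< 21) ^^^ ((r % 2 ^ 21) <<< 10) : Nat) = r <<< 10 := by
      rw [Nat.zero_shiftLeft, Nat.zero_xor, Nat.mod_eq_of_lt hrlt]
    rw [h1, Int.shiftLeft_eq, Nat.shiftLeft_eq, hdata]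
    push_cast
    ring
  have hden : (1897 : Int) <<< (20:Nat) = ((1897 <<< 20 : Nat) : Int) := by
    rw [show (1897 : Int) = ((1897 : Nat) : Int) from rfl, natCast_shiftLeft']
  have hmain := main_inv 21 (by omega) hi ((1897 : Int) <<< (20:Nat)) data r 0 hdata hrlt (by norm_num)
    (fun _ => by rw [hden])
  rw [show (21 : Nat) - 21 = 0 from rfl, ← List.range_eq_range'] at hmain
  rw [hinit]
  simpa using hmain
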